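-- pv_equiv track=rewrite | github.com/vanbanana/KnowledgeOS | workers/parser/parsers/pdf_parser.py | slugify_anchor
-- ===== SOURCE A (Python) =====
-- def slugify_anchor(value: str) -> str:
--     output = []
--     previous_dash = False
--     for character in value.lower():
--         if character.isalnum():
--             output.append(character)
--             previous_dash = False
--             continue
--         if character.isspace() or character in {"-", "_", "/"}:
--             if not previous_dash:
--                 output.append("-")
--                 previous_dash = True
--     return "".join(output).strip("-") or "section"
-- ===== SOURCE B (Python) =====
-- def slugify_anchor(value: str) -> str:
--     words = []
--     current = []
--     for ch in value.lower():
--         if ch.isalnum():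
--             current.append(ch)
--         elif ch.isspace() or ch in "-_/":
--             if current:
--                 words.append("".join(current))
--                 current = []
--     if current:
--         words.append("".join(current))
--     return "-".join(words) or "section"
-- ===== Notes on version B (the rewrite author's own statement) =====
-- stated objective: simpler
-- what changed: B drops A's previous_dash flag, per-character dash emission and final strip: it accumulates alphanumeric runs as words, flushing a word at each separator, and joins the words with dashes, so run-collapsing and edge-trimming fall out of the join instead of per-character state.
import Mathlib
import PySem

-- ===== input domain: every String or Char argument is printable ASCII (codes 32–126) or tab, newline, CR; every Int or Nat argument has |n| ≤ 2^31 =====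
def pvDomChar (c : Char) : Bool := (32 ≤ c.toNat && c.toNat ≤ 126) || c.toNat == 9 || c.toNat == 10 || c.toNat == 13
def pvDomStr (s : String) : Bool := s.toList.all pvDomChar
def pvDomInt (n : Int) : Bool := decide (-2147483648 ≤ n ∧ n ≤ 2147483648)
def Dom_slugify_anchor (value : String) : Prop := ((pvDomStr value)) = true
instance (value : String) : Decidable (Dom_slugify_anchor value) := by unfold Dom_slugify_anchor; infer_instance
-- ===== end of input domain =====

-- B replaces A's dash-flag emission and final strip by a word accumulator joined with dashes (simpler decomposition, same cost).

-- ===== PORT A =====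
-- loop body of A (previous_dash flag, dash emission)
def pvStepA (st : List Char × Bool) (character : Char) : List Char × Bool :=
  if PySem.Chars.isalnum character then (st.1 ++ [character], false)
  else if PySem.Chars.isspace character || ['-', '_', '/'].contains character then
    (if !st.2 then (st.1 ++ ['-'], true) else st)
  else st

def slugify_anchor (value : String) : String :=
  let st := (PySem.Str.lower value).toList.foldl pvStepA ([], false)
  let s := PySem.Str.stripChars (String.ofList st.1) "-"
  if s = "" then "section" else s

-- ===== PORT B =====
-- loop body of B (list of finished words, current word)
def pvStepB (st : List String × List Char) (ch : Char) : List String × List Char :=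
  if PySem.Chars.isalnum ch then (st.1, st.2 ++ [ch])
  else if PySem.Chars.isspace ch || "-_/".toList.contains ch then
    (if st.2 ≠ [] then (st.1 ++ [String.ofList st.2], []) else st)
  else st

def slugify_anchor_alt (value : String) : String :=
  let st := (PySem.Str.lower value).toList.foldl pvStepB ([], [])
  let words := if st.2 ≠ [] then st.1 ++ [String.ofList st.2] else st.1
  let r := PySem.Str.join "-" words
  if r = "" then "section" else r

-- ===== PRECONDITION & SPEC =====
def Spec_slugify_anchor (value : String) (out : String) : Prop := out = slugify_anchor_alt value
instance (value : String) (out : String) : Decidable (Spec_slugify_anchor value out) := by unfold Spec_slugify_anchor; infer_instance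

-- ===== CLAIM (what is proved, stated in full; the proofs are below) =====
def Claim_equal_slugify_anchor : Prop := ∀ (value : String), Dom_slugify_anchor value → Spec_slugify_anchor value (slugify_anchor value)

-- ===== LEMMAS AND PROOFS =====

-- character classes of the shared loop: kept (alnum) and separator
def pvK (c : Char) : Bool := PySem.Chars.isalnum c
def pvS (c : Char) : Bool := PySem.Chars.isspace c || ['-', '_', '/'].contains c

-- what A's loop appends from state pd onwards
def pvEmit : List Char → Bool → List Char
  | [], _ => []
  | c :: r, pd =>
    if pvK c then c :: pvEmit r false
    else if pvS c then (if pd then pvEmit r true else '-' :: pvEmit r true)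
    else pvEmit r pd

-- the word tokens B's loop flushes, with pending word cur
def pvToks : List Char → List Char → List (List Char)
  | [], cur => if cur = [] then [] else [cur]
  | c :: r, cur =>
    if pvK c then pvToks r (cur ++ [c])
    else if pvS c then (if cur = [] then pvToks r [] else cur :: pvToks r [])
    else pvToks r cur

def pvDash (c : Char) : Bool := ['-'].contains c
def pvLst (xs : List Char) : List Char := xs.dropWhile pvDash
def pvRst (xs : List Char) : List Char := (xs.reverse.dropWhile pvDash).reverse
def pvJoin (ts : List (List Char)) : List Char := PySem.Chars.join ['-'] ts

lemma pvK_not_dash {c : Char} (h : pvK c = true) : pvDash c = false := by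
  by_cases hc : c = '-'
  · subst hc; exact absurd h (by decide)
  · simp only [pvDash, List.contains_eq_mem, List.mem_singleton, decide_eq_false_iff_not]
    exact hc

lemma pvJoin_cons (a : List Char) (ts : List (List Char)) (h : ts ≠ []) :
    pvJoin (a :: ts) = a ++ ['-'] ++ pvJoin ts := by
  cases ts with
  | nil => exact absurd rfl h
  | cons b ts' => simp [pvJoin, PySem.Chars.join_cons_cons]

lemma pvDrop_allK {xs : List Char} (h : ∀ c ∈ xs, pvK c = true) :
    xs.dropWhile pvDash = xs := by
  cases xs with
  | nil => rfl
  | cons a l =>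
    rw [List.dropWhile_cons]
    simp [pvK_not_dash (h a (by simp))]

lemma pvRst_allK {xs : List Char} (h : ∀ c ∈ xs, pvK c = true) : pvRst xs = xs := by
  unfold pvRst
  rw [pvDrop_allK (by intro c hc; exact h c (List.mem_reverse.mp hc)), List.reverse_reverse]

lemma pvRst_append (xs ys : List Char) :
    pvRst (xs ++ ys) = if pvRst ys = [] then pvRst xs else xs ++ pvRst ys := by
  unfold pvRst
  rw [List.reverse_append, List.dropWhile_append]
  by_cases h : (ys.reverse.dropWhile pvDash) = []
  · simp [h]
  · simp [h, List.isEmpty_iff]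

lemma pvRst_dash (xs : List Char) :
    pvRst (['-'] ++ xs) = if pvRst xs = [] then [] else '-' :: pvRst xs := by
  rw [pvRst_append]
  by_cases h : pvRst xs = []
  · simp [h]; decide
  · simp [h]

lemma pvLst_dash_cons (xs : List Char) : pvLst ('-' :: xs) = pvLst xs := by
  simp [pvLst, List.dropWhile_cons, show pvDash '-' = true by decide]

lemma pvLst_not_dash {c : Char} (xs : List Char) (h : pvDash c = false) :
    pvLst (c :: xs) = c :: xs := by
  simp [pvLst, List.dropWhile_cons, h]

lemma pvToks_ne_nil : ∀ (cs cur : List Char), ∀ t ∈ pvToks cs cur, t ≠ [] := by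
  intro cs
  induction cs with
  | nil =>
    intro cur t ht
    by_cases h : cur = []
    · simp [pvToks, h] at ht
    · simp only [pvToks, if_neg h, List.mem_singleton] at ht
      subst ht; exact h
  | cons c r ih =>
    intro cur t ht
    simp only [pvToks] at ht
    split at ht
    · exact ih _ t ht
    · split at ht
      · by_cases h : cur = []
        · rw [if_pos h] at ht; exact ih _ t ht
        · rw [if_neg h] at ht
          rcases List.mem_cons.mp ht with rfl | ht'
          · exact h
          · exact ih _ t ht'
      · exact ih _ t ht

lemma pvJoin_eq_nil {ts : List (List Char)} (h : ∀ t ∈ ts, t ≠ []) :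
    pvJoin ts = [] ↔ ts = [] := by
  cases ts with
  | nil => simp [pvJoin, PySem.Chars.join_nil]
  | cons a ts' =>
    cases ts' with
    | nil =>
      simp only [pvJoin, PySem.Chars.join_singleton]
      simp [h a (by simp)]
    | cons b ts'' =>
      simp only [pvJoin, PySem.Chars.join_cons_cons]
      constructor
      · intro hz
        exact absurd (List.append_eq_nil_iff.mp (List.append_eq_nil_iff.mp hz).1).1 (h a (by simp))
      · intro hz; exact absurd hz (by simp)

lemma pvEmit_true_head : ∀ (cs : List Char) (c : Char) (t : List Char),
    pvEmit cs true = c :: t → pvK c = true := by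
  intro cs
  induction cs with
  | nil => intro c t h; simp [pvEmit] at h
  | cons x r ih =>
    intro c t h
    simp only [pvEmit] at h
    split at h
    · cases h; assumption
    · split at h
      · simp at h; exact ih c t h
      · exact ih c t h

lemma pvGH : ∀ cs : List Char,
    (pvRst (pvEmit cs true) = pvJoin (pvToks cs [])) ∧
    (∀ cur : List Char, cur ≠ [] → (∀ c ∈ cur, pvK c = true) →
      pvRst (cur ++ pvEmit cs false) = pvJoin (pvToks cs cur)) := by
  intro cs
  induction cs with
  | nil =>
    constructor
    · simp [pvEmit, pvToks, pvRst, pvJoin, PySem.Chars.join_nil]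
    · intro cur hne hK
      simp only [pvEmit, pvToks, List.append_nil, if_neg hne]
      rw [pvRst_allK hK]
      simp [pvJoin, PySem.Chars.join_singleton]
  | cons c r ih =>
    obtain ⟨ih1, ih2⟩ := ih
    by_cases hK : pvK c = true
    · have he : pvEmit (c :: r) true = c :: pvEmit r false := by simp [pvEmit, hK]
      have hef : pvEmit (c :: r) false = c :: pvEmit r false := by simp [pvEmit, hK]
      constructor
      · rw [he, show pvToks (c :: r) [] = pvToks r [c] by simp [pvToks, hK]]
        have := ih2 [c] (by simp) (by simpa using hK)
        simpa using this
      · intro cur hne hcK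
        rw [hef, show pvToks (c :: r) cur = pvToks r (cur ++ [c]) by simp [pvToks, hK]]
        have : cur ++ c :: pvEmit r false = (cur ++ [c]) ++ pvEmit r false := by simp
        rw [this, ih2 (cur ++ [c]) (by simp) (by
          intro x hx
          rcases List.mem_append.mp hx with h | h
          · exact hcK x h
          · simp at h; subst h; exact hK)]
    · have hK' : pvK c = false := by simpa using hK
      by_cases hS : pvS c = true
      · constructor
        · rw [show pvEmit (c :: r) true = pvEmit r true by simp [pvEmit, hK', hS],
              show pvToks (c :: r) [] = pvToks r [] by simp [pvToks, hK', hS]]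
          exact ih1
        · intro cur hne hcK
          rw [show pvEmit (c :: r) false = '-' :: pvEmit r true by simp [pvEmit, hK', hS],
              show pvToks (c :: r) cur = cur :: pvToks r [] by simp [pvToks, hK', hS, hne],
              show cur ++ '-' :: pvEmit r true = cur ++ (['-'] ++ pvEmit r true) by simp,
              pvRst_append, pvRst_dash, ih1]
          by_cases h0 : pvToks r [] = []
          · rw [h0]
            simp only [pvJoin, PySem.Chars.join_nil, if_pos rfl]
            rw [pvRst_allK hcK]
            simp [pvJoin, PySem.Chars.join_singleton]
          · have hnn : pvJoin (pvToks r []) ≠ [] := by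
              intro hz
              exact h0 ((pvJoin_eq_nil (pvToks_ne_nil r [])).mp hz)
            rw [if_neg hnn, if_neg (by simp), pvJoin_cons cur (pvToks r []) h0]
            simp
      · have hS' : pvS c = false := by simpa using hS
        constructor
        · rw [show pvEmit (c :: r) true = pvEmit r true by simp [pvEmit, hK', hS'],
              show pvToks (c :: r) [] = pvToks r [] by simp [pvToks, hK', hS']]
          exact ih1
        · intro cur hne hcK
          rw [show pvEmit (c :: r) false = pvEmit r false by simp [pvEmit, hK', hS'],
              show pvToks (c :: r) cur = pvToks r cur by simp [pvToks, hK', hS']]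
          exact ih2 cur hne hcK

lemma pvMain : ∀ cs : List Char, pvRst (pvLst (pvEmit cs false)) = pvJoin (pvToks cs []) := by
  intro cs
  induction cs with
  | nil => simp [pvEmit, pvToks, pvLst, pvRst, pvJoin, PySem.Chars.join_nil]
  | cons c r ih =>
    by_cases hK : pvK c = true
    · rw [show pvEmit (c :: r) false = c :: pvEmit r false by simp [pvEmit, hK],
          show pvToks (c :: r) [] = pvToks r [c] by simp [pvToks, hK],
          pvLst_not_dash _ (pvK_not_dash hK)]
      have := (pvGH r).2 [c] (by simp) (by simpa using hK)
      simpa using this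
    · have hK' : pvK c = false := by simpa using hK
      by_cases hS : pvS c = true
      · rw [show pvEmit (c :: r) false = '-' :: pvEmit r true by simp [pvEmit, hK', hS],
            show pvToks (c :: r) [] = pvToks r [] by simp [pvToks, hK', hS],
            pvLst_dash_cons]
        cases he : pvEmit r true with
        | nil =>
          have h1 := (pvGH r).1
          rw [he] at h1
          rw [← h1]
          simp [pvLst, pvRst]
        | cons c0 t =>
          have hc0 : pvK c0 = true := pvEmit_true_head r c0 t he
          rw [pvLst_not_dash _ (pvK_not_dash hc0), ← he]
          exact (pvGH r).1
      · have hS' : pvS c = false := by simpa using hS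
        rw [show pvEmit (c :: r) false = pvEmit r false by simp [pvEmit, hK', hS'],
            show pvToks (c :: r) [] = pvToks r [] by simp [pvToks, hK', hS']]
        exact ih

lemma pvAfold : ∀ (cs out : List Char) (pd : Bool),
    (cs.foldl pvStepA (out, pd)).1 = out ++ pvEmit cs pd := by
  intro cs
  induction cs with
  | nil => intro out pd; simp [pvEmit]
  | cons c r ih =>
    intro out pd
    rw [List.foldl_cons]
    by_cases hK : PySem.Chars.isalnum c = true
    · rw [show pvStepA (out, pd) c = (out ++ [c], false) by simp [pvStepA, hK], ih]
      have hKv : pvK c = true := hK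
      simp [pvEmit, hKv]
    · have hK' : PySem.Chars.isalnum c = false := by simpa using hK
      by_cases hS : (PySem.Chars.isspace c || ['-', '_', '/'].contains c) = true
      · have hKv : pvK c = false := hK'
        have hSv : pvS c = true := hS
        cases pd with
        | false =>
          rw [show pvStepA (out, false) c = (out ++ ['-'], true) by unfold pvStepA; rw [hK', hS]; simp, ih]
          simp [pvEmit, hKv, hSv]
        | true =>
          rw [show pvStepA (out, true) c = (out, true) by unfold pvStepA; rw [hK', hS]; simp, ih]
          simp [pvEmit, hKv, hSv]
      · have hS' : (PySem.Chars.isspace c || ['-', '_', '/'].contains c) = false := by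
          simpa using hS
        have hKv : pvK c = false := hK'
        have hSv : pvS c = false := hS'
        rw [show pvStepA (out, pd) c = (out, pd) by unfold pvStepA; rw [hK', hS']; simp, ih]
        simp [pvEmit, hKv, hSv]

lemma pvStrEq : "-_/".toList = ['-', '_', '/'] := by decide

lemma pvBfold : ∀ (cs : List Char) (ws : List String) (cur : List Char),
    (let st := cs.foldl pvStepB (ws, cur)
     if st.2 ≠ [] then st.1 ++ [String.ofList st.2] else st.1)
      = ws ++ (pvToks cs cur).map String.ofList := by
  intro cs
  induction cs with
  | nil =>
    intro ws cur
    simp only [List.foldl_nil, pvToks]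
    by_cases h : cur = [] <;> simp [h]
  | cons c r ih =>
    intro ws cur
    rw [List.foldl_cons]
    by_cases hK : PySem.Chars.isalnum c = true
    · rw [show pvStepB (ws, cur) c = (ws, cur ++ [c]) by simp [pvStepB, hK], ih]
      have hKv : pvK c = true := hK
      rw [show pvToks (c :: r) cur = pvToks r (cur ++ [c]) by simp [pvToks, hKv]]
    · have hK' : PySem.Chars.isalnum c = false := by simpa using hK
      by_cases hS : (PySem.Chars.isspace c || "-_/".toList.contains c) = true
      · have hS2 : pvS c = true := by simpa [pvS, pvStrEq] using hS
        by_cases hc : cur = []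
        · subst hc
          rw [show pvStepB (ws, []) c = (ws, []) by unfold pvStepB; rw [hK', hS]; simp, ih]
          rw [show pvToks (c :: r) [] = pvToks r [] by simp [pvToks, show pvK c = false from hK', hS2]]
        · rw [show pvStepB (ws, cur) c = (ws ++ [String.ofList cur], []) by
              unfold pvStepB; rw [hK', hS]; simp [hc], ih]
          rw [show pvToks (c :: r) cur = cur :: pvToks r [] by simp [pvToks, show pvK c = false from hK', hS2, hc]]
          simp
      · have hS' : (PySem.Chars.isspace c || "-_/".toList.contains c) = false := by simpa using hS
        have hS2 : pvS c = false := by simpa [pvS, pvStrEq] using hS'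
        rw [show pvStepB (ws, cur) c = (ws, cur) by unfold pvStepB; rw [hK', hS']; simp, ih]
        rw [show pvToks (c :: r) cur = pvToks r cur by simp [pvToks, show pvK c = false from hK', hS2]]

lemma pvAB (value : String) : slugify_anchor value = slugify_anchor_alt value := by
  unfold slugify_anchor slugify_anchor_alt
  simp only []
  set cs := (PySem.Str.lower value).toList with hcs
  have hA : (PySem.Str.stripChars (String.ofList (cs.foldl pvStepA ([], false)).1) "-").toList
      = pvJoin (pvToks cs []) := by
    rw [PySem.Str.toList_stripChars]
    have h1 : (String.ofList (cs.foldl pvStepA ([], false)).1).toList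
        = (cs.foldl pvStepA ([], false)).1 := by simp
    rw [h1, pvAfold cs [] false, List.nil_append]
    have hstrip : ∀ xs : List Char, PySem.Chars.stripChars xs ("-" : String).toList
        = pvRst (pvLst xs) := by
      intro xs
      rfl
    rw [hstrip, pvMain]
  have hB : (PySem.Str.join "-"
      (if (cs.foldl pvStepB ([], [])).2 ≠ [] then
        (cs.foldl pvStepB ([], [])).1 ++ [String.ofList (cs.foldl pvStepB ([], [])).2]
      else (cs.foldl pvStepB ([], [])).1)).toList = pvJoin (pvToks cs []) := by
    rw [pvBfold cs [] []]
    rw [PySem.Str.toList_join]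
    simp only [List.nil_append, List.map_map]
    have hco : String.toList ∘ String.ofList = (id : List Char → List Char) :=
      funext (fun l => by simp)
    rw [hco, List.map_id]
    rfl
  have heq : PySem.Str.stripChars (String.ofList (cs.foldl pvStepA ([], false)).1) "-"
      = PySem.Str.join "-"
        (if (cs.foldl pvStepB ([], [])).2 ≠ [] then
          (cs.foldl pvStepB ([], [])).1 ++ [String.ofList (cs.foldl pvStepB ([], [])).2]
        else (cs.foldl pvStepB ([], [])).1) := by
    apply String.toList_inj.mp
    rw [hA, hB]
  rw [heq]

-- ===== VERDICT (by name: the statement is the Claim_ definition above) =====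
theorem slugify_anchor_spec : Claim_equal_slugify_anchor := by
  intro value _
  unfold Spec_slugify_anchor
  exact pvAB value
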